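-- pv_equiv track=rewrite | github.com/leofarhi/Casio3D_Engine | ConvertMake/RPG/RPG_MakerTilesets.py | WallType
-- ===== SOURCE A (Python) =====
-- taille=8
--
-- def WallType(part):#2*2
--     IDs=[(3, 2, 1, 0), (1, 0, 1, 0), (2, 2, 0, 0), (0, 0, 0, 0), (3, 2, 3, 2), (1, 0, 3, 2), (2, 2, 2, 2), (0, 0, 2, 2), (3, 3, 1, 1), (1, 1, 1, 1), (2, 3, 0, 1), (0, 1, 0, 1), (3, 3, 3, 3), (1, 1, 3, 3), (2, 3, 2, 3), (0, 1, 2, 3)]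
--
--     Parts=[]
--     Sprites=[]
--     for x in range(0,taille*2,taille):
--         for y in range(0,taille*2,taille):
--             Parts.append(subsurface(part,x,y,taille,taille))
--     for Index,part in enumerate(IDs):
--         i1,i2,i3,i4 = Parts[part[0]],Parts[part[1]],Parts[part[2]],Parts[part[3]]
--         HG = [i[:taille//2] for i in(i1[:taille//2])]
--         HD = [i[taille//2:] for i in(i3[:taille//2])]
--         BG = [i[:taille//2] for i in(i2[taille//2:])]
--         BD = [i[taille//2:] for i in(i4[taille//2:])]
--         H= [HG[i]+HD[i] for i in range(len(HG))]
--         B= [BG[i]+BD[i] for i in range(len(BG))]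
--         IMG = H+B
--         Sprites.append(IMG)
--     return Sprites
--
-- def subsurface(img,x,y,w,h):
--     return [i[x:x+w] for i in(img[y:y+h])]
-- ===== SOURCE B (Python) =====
-- taille = 8
--
-- def WallType(part):
--     IDs = [(3, 2, 1, 0), (1, 0, 1, 0), (2, 2, 0, 0), (0, 0, 0, 0), (3, 2, 3, 2), (1, 0, 3, 2), (2, 2, 2, 2), (0, 0, 2, 2), (3, 3, 1, 1), (1, 1, 1, 1), (2, 3, 0, 1), (0, 1, 0, 1), (3, 3, 3, 3), (1, 1, 3, 3), (2, 3, 2, 3), (0, 1, 2, 3)]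
--     # quadrant index -> (column offset, row offset) of its 8x8 block inside `part`
--     OFF = [(0, 0), (0, 8), (8, 0), (8, 8)]
--     sprites = []
--     for a, b, c, d in IDs:
--         (xa, ya), (xb, yb), (xc, yc), (xd, yd) = OFF[a], OFF[b], OFF[c], OFF[d]
--         top = [l[xa:xa + 4] + r[xc + 4:xc + 8]
--                for l, r in zip(part[ya:ya + 4], part[yc:yc + 4])]
--         bot = [l[xb:xb + 4] + r[xd + 4:xd + 8]
--                for l, r in zip(part[yb + 4:yb + 8], part[yd + 4:yd + 8])]
--         sprites.append(top + bot)
--     return sprites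
-- ===== Notes on version B (the rewrite author's own statement) =====
-- stated objective: simpler
-- what changed: B removes A's intermediate Parts list (four copied 8x8 quadrant blocks) and the four HG/HD/BG/BD quarter lists plus index loops, instead slicing each sprite's rows directly out of `part` using a quadrant->(column,row) offset table and a single zip per half.
import Mathlib
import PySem

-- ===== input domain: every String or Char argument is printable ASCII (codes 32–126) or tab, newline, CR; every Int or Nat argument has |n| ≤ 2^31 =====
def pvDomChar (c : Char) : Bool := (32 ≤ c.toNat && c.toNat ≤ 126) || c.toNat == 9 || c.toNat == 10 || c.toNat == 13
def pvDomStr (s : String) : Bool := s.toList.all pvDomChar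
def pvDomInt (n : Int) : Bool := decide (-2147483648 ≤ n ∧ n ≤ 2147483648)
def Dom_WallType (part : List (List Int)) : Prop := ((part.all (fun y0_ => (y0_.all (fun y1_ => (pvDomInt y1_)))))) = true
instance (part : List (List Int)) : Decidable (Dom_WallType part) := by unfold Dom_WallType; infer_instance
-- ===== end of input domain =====

-- B drops A's Parts list and quadrant-block extraction and assembles each sprite row directly
-- from `part` via the four blocks' (column, row) offsets — a simpler decomposition, same result.

-- ===== PORT A =====
-- helper `subsurface` of A
def pySubsurface (img : List (List Int)) (x y w h : Int) : List (List Int) :=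
  (PySem.List.slice img (some y) (some (y+h))).map (fun i => PySem.List.slice i (some x) (some (x+w)))

def wallIDs_A : List (Int × Int × Int × Int) :=
  [(3,2,1,0),(1,0,1,0),(2,2,0,0),(0,0,0,0),(3,2,3,2),(1,0,3,2),(2,2,2,2),(0,0,2,2),
   (3,3,1,1),(1,1,1,1),(2,3,0,1),(0,1,0,1),(3,3,3,3),(1,1,3,3),(2,3,2,3),(0,1,2,3)]

-- the body of A's `for Index,part in enumerate(IDs)` loop (tuple unpacking, HG/HD/BG/BD, H+B)
def wallSpriteA (Parts : List (List (List Int))) (pt : Int × Int × Int × Int) : List (List Int) :=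
  let t2 : Int := PySem.Int.floordiv 8 2
  let i1 := PySem.List.pyGetD Parts pt.1 []
  let i2 := PySem.List.pyGetD Parts pt.2.1 []
  let i3 := PySem.List.pyGetD Parts pt.2.2.1 []
  let i4 := PySem.List.pyGetD Parts pt.2.2.2 []
  let HG := (PySem.List.slice i1 none (some t2)).map (fun i => PySem.List.slice i none (some t2))
  let HD := (PySem.List.slice i3 none (some t2)).map (fun i => PySem.List.slice i (some t2) none)
  let BG := (PySem.List.slice i2 (some t2) none).map (fun i => PySem.List.slice i none (some t2))
  let BD := (PySem.List.slice i4 (some t2) none).map (fun i => PySem.List.slice i (some t2) none)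
  let H := (PySem.List.pyRange 0 (HG.length : Int) 1).map (fun i => PySem.List.pyGetD HG i [] ++ PySem.List.pyGetD HD i [])
  let B := (PySem.List.pyRange 0 (BG.length : Int) 1).map (fun i => PySem.List.pyGetD BG i [] ++ PySem.List.pyGetD BD i [])
  H ++ B

def WallType (part : List (List Int)) : List (List (List Int)) :=
  let taille : Int := 8
  let Parts := (PySem.List.pyRange 0 (taille*2) taille).foldl (fun Ps x =>
      (PySem.List.pyRange 0 (taille*2) taille).foldl (fun Ps y =>
        Ps ++ [pySubsurface part x y taille taille]) Ps) []
  (PySem.List.enumerate wallIDs_A).foldl (fun Sprites ip => Sprites ++ [wallSpriteA Parts ip.2]) []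

-- ===== PORT B =====
def wallIDs_B : List (Int × Int × Int × Int) :=
  [(3,2,1,0),(1,0,1,0),(2,2,0,0),(0,0,0,0),(3,2,3,2),(1,0,3,2),(2,2,2,2),(0,0,2,2),
   (3,3,1,1),(1,1,1,1),(2,3,0,1),(0,1,0,1),(3,3,3,3),(1,1,3,3),(2,3,2,3),(0,1,2,3)]

-- quadrant index -> (column offset, row offset) of its 8x8 block inside `part`
def wallOFF : List (Int × Int) := [(0,0),(0,8),(8,0),(8,8)]

-- body of B's `for a, b, c, d in IDs` loop: top and bot row lists read directly from part
def wallSpriteB (part : List (List Int)) (q : Int × Int × Int × Int) : List (List Int) :=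
  let oa := PySem.List.pyGetD wallOFF q.1 (0,0)
  let ob := PySem.List.pyGetD wallOFF q.2.1 (0,0)
  let oc := PySem.List.pyGetD wallOFF q.2.2.1 (0,0)
  let od := PySem.List.pyGetD wallOFF q.2.2.2 (0,0)
  let top := List.zipWith
      (fun l r => PySem.List.slice l (some oa.1) (some (oa.1+4)) ++ PySem.List.slice r (some (oc.1+4)) (some (oc.1+8)))
      (PySem.List.slice part (some oa.2) (some (oa.2+4))) (PySem.List.slice part (some oc.2) (some (oc.2+4)))
  let bot := List.zipWith
      (fun l r => PySem.List.slice l (some ob.1) (some (ob.1+4)) ++ PySem.List.slice r (some (od.1+4)) (some (od.1+8)))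
      (PySem.List.slice part (some (ob.2+4)) (some (ob.2+8))) (PySem.List.slice part (some (od.2+4)) (some (od.2+8)))
  top ++ bot

def WallType_alt (part : List (List Int)) : List (List (List Int)) :=
  wallIDs_B.foldl (fun sprites q => sprites ++ [wallSpriteB part q]) []

-- ===== PRECONDITION & SPEC =====
def Spec_WallType (part : List (List Int)) (out : List (List (List Int))) : Prop := out = WallType_alt part
instance (part : List (List Int)) (out : List (List (List Int))) : Decidable (Spec_WallType part out) := by unfold Spec_WallType; infer_instance

-- ===== CLAIM (what is proved, stated in full; the proofs are below) =====
def Claim_equal_WallType : Prop := ∀ (part : List (List Int)), Dom_WallType part → Spec_WallType part (WallType part)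

-- ===== LEMMAS AND PROOFS =====
-- normal form of a half sprite: 4 rows of part starting at row y.toNat (+4 for halfB),
-- each row = 4 cells from column xl.toNat ++ 4 cells from column xr.toNat+4
def halfN (p : List (List Int)) (xl xr y : Int) : List (List Int) :=
  ((p.drop y.toNat).take 4).map (fun r => (r.drop xl.toNat).take 4 ++ (r.drop (xr.toNat + 4)).take 4)

def halfB (p : List (List Int)) (xl xr y : Int) : List (List Int) :=
  ((p.drop (y.toNat + 4)).take 4).map (fun r => (r.drop xl.toNat).take 4 ++ (r.drop (xr.toNat + 4)).take 4)

-- A's `[HG[i]+HD[i] for i in range(len(HG))]` over two maps of the same base list is a rowwise map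
lemma idx_pair (base : List (List Int)) (f g : List Int → List Int) :
  (PySem.List.pyRange 0 ((base.map f).length : Int) 1).map
    (fun i => PySem.List.pyGetD (base.map f) i [] ++ PySem.List.pyGetD (base.map g) i [])
  = base.map (fun b => f b ++ g b) := by
  rw [List.length_map, PySem.List.pyRange_zero_nat, List.map_map]
  apply List.ext_getElem
  · simp
  · intro k h1 h2
    have hk : k < base.length := by simpa using h2
    simp [List.getElem?_eq_getElem hk]

lemma zipWith_self {α β : Type} (f : α → α → β) (l : List α) :
    List.zipWith f l l = l.map (fun x => f x x) := by
  induction l with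
  | nil => rfl
  | cons a t ih => simp

lemma A_top (p : List (List Int)) (xl xr y : Int) (hxl : 0 ≤ xl) (hxr : 0 ≤ xr) (hy : 0 ≤ y) :
    (PySem.List.pyRange 0
        (((PySem.List.slice (pySubsurface p xl y 8 8) none (some 4)).map
            (fun i => PySem.List.slice i none (some 4))).length : Int) 1).map
      (fun i =>
        PySem.List.pyGetD ((PySem.List.slice (pySubsurface p xl y 8 8) none (some 4)).map
            (fun i => PySem.List.slice i none (some 4))) i [] ++
        PySem.List.pyGetD ((PySem.List.slice (pySubsurface p xr y 8 8) none (some 4)).map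
            (fun i => PySem.List.slice i (some 4) none)) i [])
    = halfN p xl xr y := by
  have e1 : ∀ x : Int, 0 ≤ x → (x+8).toNat - x.toNat = 8 := by omega
  unfold pySubsurface
  rw [PySem.List.slice_toNat p hy (by omega), e1 y hy,
      PySem.List.slice_to _ (by norm_num : (0:Int) ≤ 4),
      PySem.List.slice_to _ (by norm_num : (0:Int) ≤ 4)]
  simp only [PySem.List.slice_toNat _ hxl (by omega : (0:Int) ≤ xl + 8),
             PySem.List.slice_toNat _ hxr (by omega : (0:Int) ≤ xr + 8),
             e1 xl hxl, e1 xr hxr,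
             PySem.List.slice_to _ (by norm_num : (0:Int) ≤ 4),
             PySem.List.slice_from _ (by norm_num : (0:Int) ≤ 4),
             show ((4:Int)).toNat = 4 from rfl,
             ← List.map_take, List.take_take, List.map_map, Function.comp_def,
             List.drop_take, List.drop_drop,
             show min 4 8 = 4 from rfl, show 8 - 4 = 4 from rfl]
  exact idx_pair ((p.drop y.toNat).take 4) _ _

lemma A_bot (p : List (List Int)) (xl xr y : Int) (hxl : 0 ≤ xl) (hxr : 0 ≤ xr) (hy : 0 ≤ y) :
    (PySem.List.pyRange 0
        (((PySem.List.slice (pySubsurface p xl y 8 8) (some 4) none).map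
            (fun i => PySem.List.slice i none (some 4))).length : Int) 1).map
      (fun i =>
        PySem.List.pyGetD ((PySem.List.slice (pySubsurface p xl y 8 8) (some 4) none).map
            (fun i => PySem.List.slice i none (some 4))) i [] ++
        PySem.List.pyGetD ((PySem.List.slice (pySubsurface p xr y 8 8) (some 4) none).map
            (fun i => PySem.List.slice i (some 4) none)) i [])
    = halfB p xl xr y := by
  have e1 : ∀ x : Int, 0 ≤ x → (x+8).toNat - x.toNat = 8 := by omega
  unfold pySubsurface
  rw [PySem.List.slice_toNat p hy (by omega), e1 y hy,
      PySem.List.slice_from _ (by norm_num : (0:Int) ≤ 4),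
      PySem.List.slice_from _ (by norm_num : (0:Int) ≤ 4)]
  simp only [PySem.List.slice_toNat _ hxl (by omega : (0:Int) ≤ xl + 8),
             PySem.List.slice_toNat _ hxr (by omega : (0:Int) ≤ xr + 8),
             e1 xl hxl, e1 xr hxr,
             PySem.List.slice_to _ (by norm_num : (0:Int) ≤ 4),
             PySem.List.slice_from _ (by norm_num : (0:Int) ≤ 4),
             show ((4:Int)).toNat = 4 from rfl,
             ← List.map_drop, List.map_map, Function.comp_def,
             List.drop_take, List.drop_drop, List.take_take,
             show min 4 8 = 4 from rfl, show 8 - 4 = 4 from rfl]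
  exact idx_pair ((p.drop (y.toNat + 4)).take 4) _ _

lemma B_top (p : List (List Int)) (xl xr y : Int) (hxl : 0 ≤ xl) (hxr : 0 ≤ xr) (hy : 0 ≤ y) :
    List.zipWith (fun l r => PySem.List.slice l (some xl) (some (xl+4)) ++ PySem.List.slice r (some (xr+4)) (some (xr+8)))
      (PySem.List.slice p (some y) (some (y+4))) (PySem.List.slice p (some y) (some (y+4)))
    = halfN p xl xr y := by
  rw [PySem.List.slice_toNat p hy (by omega), show (y+4).toNat - y.toNat = 4 from by omega,
      zipWith_self]
  simp only [halfN, PySem.List.slice_toNat _ hxl (by omega : (0:Int) ≤ xl + 4),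
             PySem.List.slice_toNat _ (by omega : (0:Int) ≤ xr + 4) (by omega : (0:Int) ≤ xr + 8),
             show (xl+4).toNat - xl.toNat = 4 from by omega,
             show (xr+4).toNat = xr.toNat + 4 from by omega,
             show ∀ x:Int, 0 ≤ x → (x+8).toNat - (x.toNat + 4) = 4 from by omega, hxr]

lemma B_bot (p : List (List Int)) (xl xr y : Int) (hxl : 0 ≤ xl) (hxr : 0 ≤ xr) (hy : 0 ≤ y) :
    List.zipWith (fun l r => PySem.List.slice l (some xl) (some (xl+4)) ++ PySem.List.slice r (some (xr+4)) (some (xr+8)))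
      (PySem.List.slice p (some (y+4)) (some (y+8))) (PySem.List.slice p (some (y+4)) (some (y+8)))
    = halfB p xl xr y := by
  rw [PySem.List.slice_toNat p (by omega : (0:Int) ≤ y + 4) (by omega : (0:Int) ≤ y + 8),
      show (y+8).toNat - (y+4).toNat = 4 from by omega,
      show (y+4).toNat = y.toNat + 4 from by omega,
      zipWith_self]
  simp only [halfB, PySem.List.slice_toNat _ hxl (by omega : (0:Int) ≤ xl + 4),
             PySem.List.slice_toNat _ (by omega : (0:Int) ≤ xr + 4) (by omega : (0:Int) ≤ xr + 8),
             show (xl+4).toNat - xl.toNat = 4 from by omega,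
             show (xr+4).toNat = xr.toNat + 4 from by omega,
             show ∀ x:Int, 0 ≤ x → (x+8).toNat - (x.toNat + 4) = 4 from by omega, hxr]

lemma getD4_0 {α : Type} (a b c d x : α) : PySem.List.pyGetD [a,b,c,d] 0 x = a := rfl
lemma getD4_1 {α : Type} (a b c d x : α) : PySem.List.pyGetD [a,b,c,d] 1 x = b := rfl
lemma getD4_2 {α : Type} (a b c d x : α) : PySem.List.pyGetD [a,b,c,d] 2 x = c := rfl
lemma getD4_3 {α : Type} (a b c d x : α) : PySem.List.pyGetD [a,b,c,d] 3 x = d := rfl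
lemma fdiv84 : PySem.Int.floordiv 8 2 = (4:Int) := rfl

lemma map_enum {α β : Type} (g : α → β) (xs : List α) (s : Int) :
    (PySem.List.enumerate xs s).map (fun ip => g ip.2) = xs.map g := by
  rw [show (fun ip : Int × α => g ip.2) = g ∘ Prod.snd from rfl, ← List.map_map,
      PySem.List.map_snd_enumerate]

theorem walltype_eq (p : List (List Int)) : WallType p = WallType_alt p := by
  show (PySem.List.enumerate wallIDs_A 0).foldl
      (fun S ip => S ++ [wallSpriteA [pySubsurface p 0 0 8 8, pySubsurface p 0 8 8 8,
        pySubsurface p 8 0 8 8, pySubsurface p 8 8 8 8] ip.2]) []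
    = wallIDs_B.foldl (fun s q => s ++ [wallSpriteB p q]) []
  rw [PySem.List.foldl_append_singleton_eq_map, PySem.List.foldl_append_singleton_eq_map,
      List.nil_append, List.nil_append,
      map_enum (wallSpriteA [pySubsurface p 0 0 8 8, pySubsurface p 0 8 8 8,
        pySubsurface p 8 0 8 8, pySubsurface p 8 8 8 8]) wallIDs_A 0,
      show wallIDs_B = wallIDs_A from rfl]
  apply List.map_congr_left
  intro q hq
  fin_cases hq
  · simp only [wallSpriteA, wallSpriteB, wallOFF, getD4_0, getD4_1, getD4_2, getD4_3, fdiv84]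
    rw [A_top p 8 0 8 (by norm_num) (by norm_num) (by norm_num), A_bot p 8 0 0 (by norm_num) (by norm_num) (by norm_num),
        B_top p 8 0 8 (by norm_num) (by norm_num) (by norm_num), B_bot p 8 0 0 (by norm_num) (by norm_num) (by norm_num)]
  · simp only [wallSpriteA, wallSpriteB, wallOFF, getD4_0, getD4_1, fdiv84]
    rw [A_top p 0 0 8 (by norm_num) (by norm_num) (by norm_num), A_bot p 0 0 0 (by norm_num) (by norm_num) (by norm_num),
        B_top p 0 0 8 (by norm_num) (by norm_num) (by norm_num), B_bot p 0 0 0 (by norm_num) (by norm_num) (by norm_num)]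
  · simp only [wallSpriteA, wallSpriteB, wallOFF, getD4_0, getD4_2, fdiv84]
    rw [A_top p 8 0 0 (by norm_num) (by norm_num) (by norm_num), A_bot p 8 0 0 (by norm_num) (by norm_num) (by norm_num),
        B_top p 8 0 0 (by norm_num) (by norm_num) (by norm_num), B_bot p 8 0 0 (by norm_num) (by norm_num) (by norm_num)]
  · simp only [wallSpriteA, wallSpriteB, wallOFF, getD4_0, fdiv84]
    rw [A_top p 0 0 0 (by norm_num) (by norm_num) (by norm_num), A_bot p 0 0 0 (by norm_num) (by norm_num) (by norm_num),
        B_top p 0 0 0 (by norm_num) (by norm_num) (by norm_num), B_bot p 0 0 0 (by norm_num) (by norm_num) (by norm_num)]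
  · simp only [wallSpriteA, wallSpriteB, wallOFF, getD4_2, getD4_3, fdiv84]
    rw [A_top p 8 8 8 (by norm_num) (by norm_num) (by norm_num), A_bot p 8 8 0 (by norm_num) (by norm_num) (by norm_num),
        B_top p 8 8 8 (by norm_num) (by norm_num) (by norm_num), B_bot p 8 8 0 (by norm_num) (by norm_num) (by norm_num)]
  · simp only [wallSpriteA, wallSpriteB, wallOFF, getD4_0, getD4_1, getD4_2, getD4_3, fdiv84]
    rw [A_top p 0 8 8 (by norm_num) (by norm_num) (by norm_num), A_bot p 0 8 0 (by norm_num) (by norm_num) (by norm_num),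
        B_top p 0 8 8 (by norm_num) (by norm_num) (by norm_num), B_bot p 0 8 0 (by norm_num) (by norm_num) (by norm_num)]
  · simp only [wallSpriteA, wallSpriteB, wallOFF, getD4_2, fdiv84]
    rw [A_top p 8 8 0 (by norm_num) (by norm_num) (by norm_num), A_bot p 8 8 0 (by norm_num) (by norm_num) (by norm_num),
        B_top p 8 8 0 (by norm_num) (by norm_num) (by norm_num), B_bot p 8 8 0 (by norm_num) (by norm_num) (by norm_num)]
  · simp only [wallSpriteA, wallSpriteB, wallOFF, getD4_0, getD4_2, fdiv84]
    rw [A_top p 0 8 0 (by norm_num) (by norm_num) (by norm_num), A_bot p 0 8 0 (by norm_num) (by norm_num) (by norm_num),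
        B_top p 0 8 0 (by norm_num) (by norm_num) (by norm_num), B_bot p 0 8 0 (by norm_num) (by norm_num) (by norm_num)]
  · simp only [wallSpriteA, wallSpriteB, wallOFF, getD4_1, getD4_3, fdiv84]
    rw [A_top p 8 0 8 (by norm_num) (by norm_num) (by norm_num), A_bot p 8 0 8 (by norm_num) (by norm_num) (by norm_num),
        B_top p 8 0 8 (by norm_num) (by norm_num) (by norm_num), B_bot p 8 0 8 (by norm_num) (by norm_num) (by norm_num)]
  · simp only [wallSpriteA, wallSpriteB, wallOFF, getD4_1, fdiv84]
    rw [A_top p 0 0 8 (by norm_num) (by norm_num) (by norm_num), A_bot p 0 0 8 (by norm_num) (by norm_num) (by norm_num),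
        B_top p 0 0 8 (by norm_num) (by norm_num) (by norm_num), B_bot p 0 0 8 (by norm_num) (by norm_num) (by norm_num)]
  · simp only [wallSpriteA, wallSpriteB, wallOFF, getD4_0, getD4_1, getD4_2, getD4_3, fdiv84]
    rw [A_top p 8 0 0 (by norm_num) (by norm_num) (by norm_num), A_bot p 8 0 8 (by norm_num) (by norm_num) (by norm_num),
        B_top p 8 0 0 (by norm_num) (by norm_num) (by norm_num), B_bot p 8 0 8 (by norm_num) (by norm_num) (by norm_num)]
  · simp only [wallSpriteA, wallSpriteB, wallOFF, getD4_0, getD4_1, fdiv84]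
    rw [A_top p 0 0 0 (by norm_num) (by norm_num) (by norm_num), A_bot p 0 0 8 (by norm_num) (by norm_num) (by norm_num),
        B_top p 0 0 0 (by norm_num) (by norm_num) (by norm_num), B_bot p 0 0 8 (by norm_num) (by norm_num) (by norm_num)]
  · simp only [wallSpriteA, wallSpriteB, wallOFF, getD4_3, fdiv84]
    rw [A_top p 8 8 8 (by norm_num) (by norm_num) (by norm_num), A_bot p 8 8 8 (by norm_num) (by norm_num) (by norm_num),
        B_top p 8 8 8 (by norm_num) (by norm_num) (by norm_num), B_bot p 8 8 8 (by norm_num) (by norm_num) (by norm_num)]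
  · simp only [wallSpriteA, wallSpriteB, wallOFF, getD4_1, getD4_3, fdiv84]
    rw [A_top p 0 8 8 (by norm_num) (by norm_num) (by norm_num), A_bot p 0 8 8 (by norm_num) (by norm_num) (by norm_num),
        B_top p 0 8 8 (by norm_num) (by norm_num) (by norm_num), B_bot p 0 8 8 (by norm_num) (by norm_num) (by norm_num)]
  · simp only [wallSpriteA, wallSpriteB, wallOFF, getD4_2, getD4_3, fdiv84]
    rw [A_top p 8 8 0 (by norm_num) (by norm_num) (by norm_num), A_bot p 8 8 8 (by norm_num) (by norm_num) (by norm_num),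
        B_top p 8 8 0 (by norm_num) (by norm_num) (by norm_num), B_bot p 8 8 8 (by norm_num) (by norm_num) (by norm_num)]
  · simp only [wallSpriteA, wallSpriteB, wallOFF, getD4_0, getD4_1, getD4_2, getD4_3, fdiv84]
    rw [A_top p 0 8 0 (by norm_num) (by norm_num) (by norm_num), A_bot p 0 8 8 (by norm_num) (by norm_num) (by norm_num),
        B_top p 0 8 0 (by norm_num) (by norm_num) (by norm_num), B_bot p 0 8 8 (by norm_num) (by norm_num) (by norm_num)]

-- ===== VERDICT (by name: the statement is the Claim_ definition above) =====
theorem WallType_spec : Claim_equal_WallType := by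
  intro part _
  unfold Spec_WallType
  exact walltype_eq part
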